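-- pv_equiv track=rewrite | github.com/ShahZafrani/advent-of-code | 2021/10/syntax.py | scoreFix
-- ===== SOURCE A (Python) =====
-- def scoreFix(fix):
--     closers = ["]", ")", "}", ">"]
--     scores = [2, 1, 3, 4]
--     scoreDict = {}
--     for c, s in zip(closers, scores):
--         scoreDict[c] = s
--     score = 0
--     for i in range(0, len(fix)):
--         score = score * 5
--         score += scoreDict[fix[i]]
--     return score
-- ===== SOURCE B (Python) =====
-- def scoreFix(fix):
--     scoreDict = {"]": 2, ")": 1, "}": 3, ">": 4}
--     total = 0
--     power = 1
--     for c in reversed(fix):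
--         total += scoreDict[c] * power
--         power *= 5
--     return total
-- ===== Notes on version B (the rewrite author's own statement) =====
-- stated objective: alternative
-- what changed: Replaces A's forward Horner accumulation (score = score*5 + digit, after building the digit dict by zipping two parallel lists) with a reverse-order positional weighted sum (total += digit * power, power *= 5, dict written as a literal).
import Mathlib
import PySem

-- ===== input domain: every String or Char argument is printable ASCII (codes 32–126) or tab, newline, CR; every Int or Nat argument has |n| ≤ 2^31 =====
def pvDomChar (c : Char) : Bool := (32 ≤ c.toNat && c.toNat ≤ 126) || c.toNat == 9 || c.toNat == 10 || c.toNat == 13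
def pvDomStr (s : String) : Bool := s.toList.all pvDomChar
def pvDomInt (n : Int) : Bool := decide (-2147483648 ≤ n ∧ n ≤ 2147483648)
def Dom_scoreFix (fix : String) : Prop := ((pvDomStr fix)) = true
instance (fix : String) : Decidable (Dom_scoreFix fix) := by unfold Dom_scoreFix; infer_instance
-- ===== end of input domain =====

-- B replaces A's forward Horner accumulation with a reverse-order positional weighted sum (alternative decomposition, same cost).

-- ===== PORT A =====
-- A builds scoreDict by zipping the closers list with the scores list, then runs a Horner loop.
def scoreFixDict : PySem.Dict Char Int :=
  (List.zip [']', ')', '}', '>'] ([2, 1, 3, 4] : List Int)).foldl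
    (fun d p => d.insert p.1 p.2) (PySem.Dict.empty : PySem.Dict Char Int)

def scoreFix (fix : String) : Int :=
  fix.toList.foldl (fun score c => score * 5 + (scoreFixDict.get? c).getD 0) 0
  -- scoreDict[fix[i]] raises KeyError on a char outside the dict; Pre_ excludes those inputs.

-- ===== PORT B =====
-- B's dict literal.
def scoreFixDictB : PySem.Dict Char Int :=
  PySem.Dict.ofList [(']', 2), (')', 1), ('}', 3), ('>', 4)]

def scoreFix_alt (fix : String) : Int :=
  (fix.toList.reverse.foldl
    (fun (tp : Int × Int) c => (tp.1 + (scoreFixDictB.get? c).getD 0 * tp.2, tp.2 * 5))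
    (0, 1)).1
  -- scoreDict[c] raises KeyError on a char outside the dict; Pre_ excludes those inputs.

-- ===== PRECONDITION & SPEC =====
-- Pre_ excludes strings containing a character other than the four closers, on which Python A raises KeyError.
def Pre_scoreFix (fix : String) : Prop :=
  (fix.toList.all (fun c => c == ']' || c == ')' || c == '}' || c == '>')) = true
instance (fix : String) : Decidable (Pre_scoreFix fix) := by unfold Pre_scoreFix; infer_instance

def pvWitness_scoreFix : String := ")}>]"

def Spec_scoreFix (fix : String) (out : Int) : Prop := out = scoreFix_alt fix
instance (fix : String) (out : Int) : Decidable (Spec_scoreFix fix out) := by unfold Spec_scoreFix; infer_instance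

-- ===== CLAIM (what is proved, stated in full; the proofs are below) =====
def Claim_equal_scoreFix : Prop := ∀ (fix : String), Dom_scoreFix fix → Pre_scoreFix fix → Spec_scoreFix fix (scoreFix fix)

-- ===== LEMMAS AND PROOFS =====

-- shifting the Horner accumulator
lemma horner_shift (f : Char → Int) (l : List Char) (a : Int) :
    l.foldl (fun s c => s * 5 + f c) a
      = a * 5 ^ l.length + l.foldl (fun s c => s * 5 + f c) 0 := by
  induction l generalizing a with
  | nil => simp
  | cons c l ih =>
    simp only [List.foldl_cons, List.length_cons]
    rw [ih (a * 5 + f c), ih (0 * 5 + f c)]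
    ring

-- B's reverse loop, expressed as a foldr, computes (Horner value, 5^length)
lemma powsum_foldr (f : Char → Int) (l : List Char) :
    l.foldr (fun c (tp : Int × Int) => (tp.1 + f c * tp.2, tp.2 * 5)) (0, 1)
      = (l.foldl (fun s c => s * 5 + f c) 0, 5 ^ l.length) := by
  induction l with
  | nil => simp
  | cons c l ih =>
    simp only [List.foldr_cons, ih, List.foldl_cons, List.length_cons]
    refine Prod.ext ?_ ?_
    · simp only
      rw [horner_shift f l (0 * 5 + f c)]
      ring
    · simp [pow_succ]

-- the two ports use the same digit function
lemma dict_eq : scoreFixDictB = scoreFixDict := by decide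

theorem scoreFix_spec : Claim_equal_scoreFix := by
  intro fix _ _
  unfold Spec_scoreFix scoreFix scoreFix_alt
  rw [dict_eq, List.foldl_reverse]
  have h := powsum_foldr (fun c => (scoreFixDict.get? c).getD 0) fix.toList
  rw [h]
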